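-- pv_equiv track=rewrite | github.com/AnnaGrBio/DESWOMAN | deswoman_src/module_global_alignment_properties.py | splice_alignment
-- ===== SOURCE A (Python) =====
-- def splice_alignment(alignment : list) -> (list, list):
--     """
--     Splices alignments that contain introns, extracting the intronic regions and removing them from the alignment.
--
--     This function processes an alignment pair (denovo and nchit) by identifying introns (represented by lowercase letters in the denovo sequence).
--     The function removes the intronic regions from both sequences in the alignment and returns the spliced sequences along with a list of the removed introns.
--
--     Parameters:
--     -----------
--     alignment : list
--         A list containing two strings:
--         - `denovo`: A denovo sequence where lowercase letters represent introns.
--         - `nchit`: A homologous sequence aligned to the denovo sequence.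
--
--     Returns:
--     --------
--     alignment : list
--         A list of two strings:
--         - The spliced `denovo` sequence with introns removed.
--         - The corresponding `nchit` sequence with the introns removed.
--     list_introns : list
--         A list of strings representing the removed intronic regions from the denovo sequence.
--     """
--     last_previous = "A"
--     denovo = alignment[0]
--     nchit = alignment[1]
--     new_seq_denovo = ""
--     new_seq_hit = ""
--     list_introns = []
--     seq_intron = ""
--     for number in range(0,len(denovo)):
--         nucl_denovo = denovo[number]
--         if nucl_denovo == "-":
--             if last_previous.isupper():
--                 new_seq_denovo += nucl_denovo
--                 new_seq_hit += nchit[number]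
--             else:
--                 seq_intron += nucl_denovo
--         else:
--             if nucl_denovo.islower() == False:
--                 if seq_intron != "":
--                     list_introns.append(seq_intron)
--                     seq_intron = ""
--                 last_previous = nucl_denovo
--                 new_seq_denovo += nucl_denovo
--                 new_seq_hit += nchit[number]
--             else:
--                 last_previous = nucl_denovo
--                 seq_intron += nucl_denovo
--     if seq_intron != "":
--         list_introns.append(seq_intron)
--     alignment = [new_seq_denovo,new_seq_hit]
--     return alignment,list_introns
-- ===== SOURCE B (Python) =====
-- def splice_alignment(alignment):
--     denovo = alignment[0]
--     nchit = alignment[1]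
--     # pass 1: classify every position of denovo as kept (True) or intronic (False)
--     prev = "A"
--     states = []
--     for c in denovo:
--         if c == "-":
--             states.append(prev.isupper())
--         elif c.islower():
--             states.append(False)
--             prev = c
--         else:
--             states.append(True)
--             prev = c
--     # pass 2: project both sequences onto the kept positions
--     new_seq_denovo = "".join(c for c, k in zip(denovo, states) if k)
--     new_seq_hit = "".join(nchit[i] for i, k in enumerate(states) if k)
--     # pass 3: the introns are the maximal runs of non-kept positions
--     list_introns = _intron_runs(list(zip(denovo, states)))
--     return [new_seq_denovo, new_seq_hit], list_introns
--
--
-- def _intron_runs(pairs):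
--     i = 0
--     while i < len(pairs) and pairs[i][1]:
--         i += 1
--     if i == len(pairs):
--         return []
--     j = i
--     run = []
--     while j < len(pairs) and not pairs[j][1]:
--         run.append(pairs[j][0])
--         j += 1
--     return ["".join(run)] + _intron_runs(pairs[j:])
-- ===== Notes on version B (the rewrite author's own statement) =====
-- stated objective: alternative
-- what changed: A's single loop threading five accumulators (last char, both output strings, the intron list and a pending intron buffer) is replaced by three independent passes: first compute a keep/intron state for every position, then project each sequence onto the kept positions, then collect the introns as the maximal runs of non-kept positions.
import Mathlib
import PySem

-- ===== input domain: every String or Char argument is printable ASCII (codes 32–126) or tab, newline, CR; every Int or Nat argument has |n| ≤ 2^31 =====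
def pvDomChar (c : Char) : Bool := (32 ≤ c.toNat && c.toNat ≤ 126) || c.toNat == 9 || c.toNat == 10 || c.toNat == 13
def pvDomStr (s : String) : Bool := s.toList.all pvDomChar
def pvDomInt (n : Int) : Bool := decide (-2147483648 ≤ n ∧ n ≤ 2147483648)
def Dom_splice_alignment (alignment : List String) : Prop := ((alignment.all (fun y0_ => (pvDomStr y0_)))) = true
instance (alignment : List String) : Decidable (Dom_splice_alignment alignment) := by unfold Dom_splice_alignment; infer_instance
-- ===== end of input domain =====

-- B replaces A's single five-accumulator loop by three passes over a precomputed keep/intron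
-- state list (objective: alternative decomposition, same linear cost).


-- ===== PORT A =====
-- loop body of A; the state is (last_previous, new_seq_denovo, new_seq_hit, list_introns, seq_intron);
-- nchit[number] is PySem.List.pyGetD: Pre_ guarantees the index is in range wherever it is read
def spliceStep (nchit : List Char)
    (st : Char × List Char × List Char × List String × List Char) (p : Int × Char) :
    Char × List Char × List Char × List String × List Char :=
  match st, p with
  | (lastPrev, nd, nh, li, si), (number, c) =>
    if c = '-' then
      if PySem.Chars.isupper lastPrev then
        (lastPrev, nd ++ [c], nh ++ [PySem.List.pyGetD nchit number ' '], li, si)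
      else
        (lastPrev, nd, nh, li, si ++ [c])
    else
      if PySem.Chars.islower c = false then
        (c, nd ++ [c], nh ++ [PySem.List.pyGetD nchit number ' '],
          (if si ≠ [] then li ++ [String.mk si] else li), [])
      else
        (c, nd, nh, li, si ++ [c])

def splice_alignment (alignment : List String) : List String × List String :=
  let denovo := ((PySem.List.pyGet? alignment 0).getD "").toList
  let nchit := ((PySem.List.pyGet? alignment 1).getD "").toList
  match (PySem.List.pyRange 0 (PySem.List.len denovo)).foldl
      (fun st number => spliceStep nchit st (number, PySem.List.pyGetD denovo number ' '))
      ('A', [], [], [], []) with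
  | (_, nd, nh, li, si) =>
    ([String.mk nd, String.mk nh], if si ≠ [] then li ++ [String.mk si] else li)

-- ===== PORT B =====
-- pass 1 body: classify a position as kept (true) / intronic (false), tracking the last non-gap char
def stateStep (st : Char × List Bool) (c : Char) : Char × List Bool :=
  if c = '-' then (st.1, st.2 ++ [PySem.Chars.isupper st.1])
  else if PySem.Chars.islower c then (c, st.2 ++ [false])
  else (c, st.2 ++ [true])

-- pass 3: maximal runs of non-kept positions (Source B's _intron_runs; the index scans are takeWhile/dropWhile)
def intronRuns : List (Char × Bool) → List (List Char)
  | [] => []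
  | (_, true) :: rest => intronRuns rest
  | (c, false) :: rest =>
      (c :: (rest.takeWhile (fun p => !p.2)).map (fun p => p.1)) ::
        intronRuns (rest.dropWhile (fun p => !p.2))
  termination_by l => l.length
  decreasing_by
    all_goals
      (try have := List.length_dropWhile_le (fun p : Char × Bool => !p.2) rest)
      simp only [List.length_cons]
      omega

def splice_alignment_alt (alignment : List String) : List String × List String :=
  let denovo := ((PySem.List.pyGet? alignment 0).getD "").toList
  let nchit := ((PySem.List.pyGet? alignment 1).getD "").toList
  let states := (denovo.foldl stateStep ('A', [])).2
  let newDenovo := ((denovo.zip states).filter (fun p => p.2)).map (fun p => p.1)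
  let newHit := ((PySem.List.enumerate states).filter (fun p => p.2)).map
      (fun p => PySem.List.pyGetD nchit p.1 ' ')
  ([String.mk newDenovo, String.mk newHit], (intronRuns (denovo.zip states)).map String.mk)

-- ===== PRECONDITION & SPEC =====
-- the last non-gap character strictly before position i (Python's last_previous, initially "A")
def pvPrev (denovo : List Char) (i : Nat) : Char :=
  (((denovo.take i).filter (fun c => c ≠ '-')).getLast?).getD 'A'

-- position i of denovo is kept (the loop reads nchit[i] exactly at these positions)
def pvKept (denovo : List Char) (i : Nat) : Bool :=
  match denovo[i]? with
  | none => false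
  | some c => if c = '-' then PySem.Chars.isupper (pvPrev denovo i) else !PySem.Chars.islower c

-- exactly the inputs on which Python A returns: at least two sequences (else alignment[0]/[1]
-- is an IndexError) and the hit sequence is long enough at every kept position (else nchit[number]
-- is an IndexError)
def Pre_splice_alignment (alignment : List String) : Prop :=
  2 ≤ alignment.length ∧
  ∀ i : Nat, i < ((alignment[0]?).getD "").toList.length →
    pvKept ((alignment[0]?).getD "").toList i = true →
    i < ((alignment[1]?).getD "").toList.length
instance (alignment : List String) : Decidable (Pre_splice_alignment alignment) := by
  unfold Pre_splice_alignment; infer_instance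

def pvWitness_splice_alignment : List String := ["AC-gt-A", "ACXAAAA"]

def Spec_splice_alignment (alignment : List String) (out : List String × List String) : Prop := out = splice_alignment_alt alignment
instance (alignment : List String) (out : List String × List String) : Decidable (Spec_splice_alignment alignment out) := by unfold Spec_splice_alignment; infer_instance

-- ===== CLAIM (what is proved, stated in full; the proofs are below) =====
def Claim_equal_splice_alignment : Prop := ∀ (alignment : List String), Dom_splice_alignment alignment → Pre_splice_alignment alignment → Spec_splice_alignment alignment (splice_alignment alignment)

-- ===== LEMMAS AND PROOFS =====

-- canonical recursive descriptions of the loop's four outputs, used to meet both ports in the middle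
def prevAfter (prev : Char) : List Char → Char
  | [] => prev
  | c :: r => prevAfter (if c = '-' then prev else c) r

def statesFrom (prev : Char) : List Char → List Bool
  | [] => []
  | c :: r =>
    if c = '-' then PySem.Chars.isupper prev :: statesFrom prev r
    else if PySem.Chars.islower c then false :: statesFrom c r
    else true :: statesFrom c r

def keptC (prev : Char) : List Char → List Char
  | [] => []
  | c :: r =>
    if c = '-' then (if PySem.Chars.isupper prev then c :: keptC prev r else keptC prev r)
    else if PySem.Chars.islower c = false then c :: keptC c r
    else keptC c r

def hitsC (nchit : List Char) (i : Int) (prev : Char) : List Char → List Char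
  | [] => []
  | c :: r =>
    if c = '-' then
      (if PySem.Chars.isupper prev then PySem.List.pyGetD nchit i ' ' :: hitsC nchit (i+1) prev r
       else hitsC nchit (i+1) prev r)
    else if PySem.Chars.islower c = false then PySem.List.pyGetD nchit i ' ' :: hitsC nchit (i+1) c r
    else hitsC nchit (i+1) c r

def closedC (si : List Char) (prev : Char) : List Char → List (List Char)
  | [] => []
  | c :: r =>
    if c = '-' then (if PySem.Chars.isupper prev then closedC si prev r else closedC (si ++ [c]) prev r)
    else if PySem.Chars.islower c = false then
      (if si ≠ [] then [si] else []) ++ closedC [] c r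
    else closedC (si ++ [c]) c r

def pendC (si : List Char) (prev : Char) : List Char → List Char
  | [] => si
  | c :: r =>
    if c = '-' then (if PySem.Chars.isupper prev then pendC si prev r else pendC (si ++ [c]) prev r)
    else if PySem.Chars.islower c = false then pendC [] c r
    else pendC (si ++ [c]) c r

-- doneRuns ++ pendPart pending = all intron runs
def pendPart (si : List Char) : List (List Char) := if si ≠ [] then [si] else []

theorem intronRuns_nil : intronRuns [] = [] := by rw [intronRuns.eq_def]
theorem intronRuns_keep (c : Char) (rest : List (Char × Bool)) :
    intronRuns ((c, true) :: rest) = intronRuns rest := by rw [intronRuns.eq_def]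
theorem intronRuns_intron (c : Char) (rest : List (Char × Bool)) :
    intronRuns ((c, false) :: rest)
      = (c :: (rest.takeWhile (fun p => !p.2)).map (fun p => p.1)) ::
          intronRuns (rest.dropWhile (fun p => !p.2)) := by rw [intronRuns.eq_def]

theorem low_not_up (c : Char) (h : PySem.Chars.islower c = true) :
    PySem.Chars.isupper c = false := by
  cases hEq : PySem.Chars.isupper c with
  | false => rfl
  | true =>
    exfalso
    simp only [PySem.Chars.islower, Bool.and_eq_true, decide_eq_true_eq] at h
    simp only [PySem.Chars.isupper, Bool.and_eq_true, decide_eq_true_eq] at hEq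
    exact absurd (le_trans h.1 hEq.2) (by decide)

-- ===== A side: the loop equals the canonical functions =====
theorem afold_eq (nchit : List Char) (rest : List Char) :
    ∀ (i : Int) (prev : Char) (nd nh : List Char) (li : List String) (si : List Char),
    (PySem.List.enumerate rest i).foldl (spliceStep nchit) (prev, nd, nh, li, si)
    = (prevAfter prev rest, nd ++ keptC prev rest, nh ++ hitsC nchit i prev rest,
       li ++ (closedC si prev rest).map String.mk, pendC si prev rest) := by
  induction rest with
  | nil => intro i prev nd nh li si; simp [PySem.List.enumerate, prevAfter, keptC, hitsC, closedC, pendC]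
  | cons c r ih =>
    intro i prev nd nh li si
    rw [PySem.List.enumerate_cons, List.foldl_cons]
    by_cases hc : c = '-'
    · by_cases hu : PySem.Chars.isupper prev
      · simp [spliceStep, hc, hu, ih, prevAfter, keptC, hitsC, closedC, pendC]
      · simp [spliceStep, hc, hu, ih, prevAfter, keptC, hitsC, closedC, pendC]
    · by_cases hl : PySem.Chars.islower c
      · simp [spliceStep, hc, hl, ih, prevAfter, keptC, hitsC, closedC, pendC]
      · simp [spliceStep, hc, hl, ih, prevAfter, keptC, hitsC, closedC, pendC, List.map_append]
        cases si <;> simp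

-- ===== B side: the three passes equal the canonical functions =====
theorem states_eq (l : List Char) :
    ∀ (prev : Char) (acc : List Bool),
    l.foldl stateStep (prev, acc) = (prevAfter prev l, acc ++ statesFrom prev l) := by
  induction l with
  | nil => intro prev acc; simp [prevAfter, statesFrom]
  | cons c r ih =>
    intro prev acc
    by_cases hc : c = '-'
    · simp [stateStep, hc, ih, prevAfter, statesFrom]
    · by_cases hl : PySem.Chars.islower c
      · simp [stateStep, hc, hl, ih, prevAfter, statesFrom]
      · simp [stateStep, hc, hl, ih, prevAfter, statesFrom]

theorem kept_eq (l : List Char) :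
    ∀ (prev : Char),
    ((l.zip (statesFrom prev l)).filter (fun p => p.2)).map (fun p => p.1) = keptC prev l := by
  induction l with
  | nil => intro prev; simp [statesFrom, keptC]
  | cons c r ih =>
    intro prev
    by_cases hc : c = '-'
    · by_cases hu : PySem.Chars.isupper prev
      · simp [statesFrom, keptC, hc, hu, ih]
      · simp [statesFrom, keptC, hc, hu, ih]
    · by_cases hl : PySem.Chars.islower c
      · simp [statesFrom, keptC, hc, hl, ih]
      · simp [statesFrom, keptC, hc, hl, ih]

theorem hits_eq (nchit : List Char) (l : List Char) :
    ∀ (i : Int) (prev : Char),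
    ((PySem.List.enumerate (statesFrom prev l) i).filter (fun p => p.2)).map
        (fun p => PySem.List.pyGetD nchit p.1 ' ')
      = hitsC nchit i prev l := by
  induction l with
  | nil => intro i prev; simp [statesFrom, hitsC]
  | cons c r ih =>
    intro i prev
    by_cases hc : c = '-'
    · by_cases hu : PySem.Chars.isupper prev
      · simp [statesFrom, hitsC, hc, hu, PySem.List.enumerate_cons, ih]
      · simp [statesFrom, hitsC, hc, hu, PySem.List.enumerate_cons, ih]
    · by_cases hl : PySem.Chars.islower c
      · simp [statesFrom, hitsC, hc, hl, PySem.List.enumerate_cons, ih]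
      · simp [statesFrom, hitsC, hc, hl, PySem.List.enumerate_cons, ih]

theorem takeWhile_falsemap (si : List Char) (l : List (Char × Bool)) :
    ((si.map (fun c => (c, false)) ++ l).takeWhile (fun p => !p.2))
      = si.map (fun c => (c, false)) ++ l.takeWhile (fun p => !p.2) := by
  induction si with
  | nil => simp
  | cons a si' ih => simp [ih]

theorem dropWhile_falsemap (si : List Char) (l : List (Char × Bool)) :
    ((si.map (fun c => (c, false)) ++ l).dropWhile (fun p => !p.2))
      = l.dropWhile (fun p => !p.2) := by
  induction si with
  | nil => simp
  | cons a si' ih => simp [ih]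

-- a nonempty pending intron prepended as false-pairs merges into the first run
theorem runs_prepend (a : Char) (si : List Char) (l : List (Char × Bool)) :
    intronRuns ((a :: si).map (fun c => (c, false)) ++ l)
      = ((a :: si) ++ (l.takeWhile (fun p => !p.2)).map (fun p => p.1)) ::
          intronRuns (l.dropWhile (fun p => !p.2)) := by
  rw [List.map_cons, List.cons_append, intronRuns_intron, takeWhile_falsemap, dropWhile_falsemap]
  simp [Function.comp_def]

theorem runs_eq (l : List Char) :
    ∀ (prev : Char) (si : List Char), (si ≠ [] → PySem.Chars.isupper prev = false) →
    closedC si prev l ++ pendPart (pendC si prev l)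
      = intronRuns (si.map (fun c => (c, false)) ++ l.zip (statesFrom prev l)) := by
  induction l with
  | nil =>
    intro prev si h
    cases si with
    | nil => simp [closedC, pendC, pendPart, intronRuns_nil]
    | cons a si' =>
      simp only [closedC, pendC, statesFrom, List.zip_nil_left, List.append_nil]
      rw [← List.append_nil (List.map (fun c => (c, false)) (a :: si')), runs_prepend]
      simp [pendPart, intronRuns_nil]
  | cons c r ih =>
    intro prev si h
    by_cases hc : c = '-'
    · subst hc
      by_cases hu : PySem.Chars.isupper prev
      · obtain rfl : si = [] := by
          cases si with
          | nil => rfl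
          | cons a si' => exact absurd (h (by simp)) (by simp [hu])
        have key := ih prev [] (by simp)
        simp only [List.map_nil, List.nil_append] at key
        simp [closedC, pendC, statesFrom, hu, intronRuns_keep, key]
      · have key := ih prev (si ++ ['-']) (fun _ => by simpa using hu)
        simp only [List.map_append, List.map_cons, List.map_nil, List.append_assoc,
          List.singleton_append] at key
        simp [closedC, pendC, statesFrom, hu, key]
    · by_cases hl : PySem.Chars.islower c
      · have key := ih c (si ++ [c]) (fun _ => low_not_up c hl)
        simp only [List.map_append, List.map_cons, List.map_nil, List.append_assoc,
          List.singleton_append] at key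
        simp [closedC, pendC, statesFrom, hc, hl, key]
      · have hl' : PySem.Chars.islower c = false := by simpa using hl
        have key := ih c [] (by simp)
        simp only [List.map_nil, List.nil_append] at key
        cases si with
        | nil => simp [closedC, pendC, statesFrom, hc, hl', intronRuns_keep, key]
        | cons a si' =>
          simp only [closedC, pendC, statesFrom, hc, hl', if_false]
          rw [runs_prepend]
          simp [intronRuns_keep, key]

-- ===== assembling the two ports =====
theorem map_mk_pendPart (li : List (List Char)) (si : List Char) :
    (li ++ pendPart si).map String.mk
      = if si ≠ [] then li.map String.mk ++ [String.mk si] else li.map String.mk := by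
  cases si <;> simp [pendPart]

theorem ports_eq (alignment : List String) :
    splice_alignment alignment = splice_alignment_alt alignment := by
  have key : ∀ (denovo nchit : List Char),
      (PySem.List.pyRange 0 (PySem.List.len denovo)).foldl
        (fun st number => spliceStep nchit st (number, PySem.List.pyGetD denovo number ' '))
        ('A', [], [], [], [])
      = (PySem.List.enumerate denovo 0).foldl (spliceStep nchit) ('A', [], [], [], []) := by
    intro denovo nchit
    rw [PySem.List.enumerate_eq_map_pyRange denovo ' ', List.foldl_map]
  have hruns := runs_eq (((PySem.List.pyGet? alignment 0).getD "").toList) 'A' [] (by simp)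
  simp only [List.map_nil, List.nil_append] at hruns
  simp only [splice_alignment, splice_alignment_alt, key, afold_eq, states_eq,
    List.nil_append, kept_eq, hits_eq, ← hruns, map_mk_pendPart]

-- ===== VERDICT (by name: the statement is the Claim_ definition above) =====
theorem splice_alignment_spec : Claim_equal_splice_alignment := by
  intro alignment _ _
  unfold Spec_splice_alignment
  exact ports_eq alignment
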